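-- pv_equiv track=rewrite | github.com/arc53/DocsGPT | application/api/user/workflows/routes.py | _can_reach_end
-- ===== SOURCE A (Python) =====
-- from typing import Any, Dict, List, Optional, Set
--
-- def _can_reach_end(
--     node_id: str, edges: List[Dict], node_map: Dict, end_ids: set, visited: set = None
-- ) -> bool:
--     if visited is None:
--         visited = set()
--     if node_id in end_ids:
--         return True
--     if node_id in visited or node_id not in node_map:
--         return False
--     visited.add(node_id)
--     outgoing = [e.get("target") for e in edges if e.get("source") == node_id]
--     return any(_can_reach_end(t, edges, node_map, end_ids, visited) for t in outgoing if t)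
-- ===== SOURCE B (Python) =====
-- def _can_reach_end(node_id, edges, node_map, end_ids, visited=None):
--     if visited is None:
--         visited = set()
--     stack = [node_id]
--     while stack:
--         cur = stack.pop()
--         if cur in end_ids:
--             return True
--         if cur in visited or cur not in node_map:
--             continue
--         visited.add(cur)
--         succs = [e.get("target") for e in edges if e.get("source") == cur and e.get("target")]
--         stack.extend(reversed(succs))
--     return False
-- ===== Notes on version B (the rewrite author's own statement) =====
-- stated objective: alternative
-- what changed: A's recursive DFS (shared mutated visited set, short-circuiting any over a recomputed outgoing list) is replaced by an iterative DFS: a while-loop over an explicit stack seeded with node_id, pushing successors in reversed order so the pop order reproduces A's left-to-right pre-order; equivalence is about the return value only (both mutate a caller-supplied visited set, possibly with different final contents on early success).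
import Mathlib
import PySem

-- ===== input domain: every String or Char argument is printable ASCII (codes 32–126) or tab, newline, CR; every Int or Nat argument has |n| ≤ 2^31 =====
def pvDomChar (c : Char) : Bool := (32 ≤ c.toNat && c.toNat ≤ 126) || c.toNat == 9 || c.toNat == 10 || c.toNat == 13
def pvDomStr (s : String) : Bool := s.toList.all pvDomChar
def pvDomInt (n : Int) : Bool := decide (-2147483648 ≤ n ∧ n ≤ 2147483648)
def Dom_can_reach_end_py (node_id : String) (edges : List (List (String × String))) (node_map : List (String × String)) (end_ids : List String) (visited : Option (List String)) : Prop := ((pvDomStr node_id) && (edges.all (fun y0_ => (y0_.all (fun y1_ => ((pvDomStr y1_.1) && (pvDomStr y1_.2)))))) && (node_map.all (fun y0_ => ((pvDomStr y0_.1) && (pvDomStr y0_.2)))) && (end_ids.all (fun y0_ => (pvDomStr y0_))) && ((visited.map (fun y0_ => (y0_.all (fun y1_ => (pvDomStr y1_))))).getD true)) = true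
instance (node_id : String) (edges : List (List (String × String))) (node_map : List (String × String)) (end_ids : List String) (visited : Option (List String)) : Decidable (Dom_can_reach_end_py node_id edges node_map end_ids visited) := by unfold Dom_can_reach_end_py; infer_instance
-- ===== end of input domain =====

-- B replaces A's recursive DFS (shared mutated visited set, short-circuit any) by an iterative DFS over an
-- explicit stack (successors pushed in reverse); equivalence is about the RETURN value only — both mutate a
-- caller-supplied visited set, but possibly with different final contents on early success.

-- ===== PORT A =====
-- e.get(k) on an edge dict (first-match lookup, exact for the association-list convention)
def pvGet (e : List (String × String)) (k : String) : Option String :=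
  PySem.Dict.get? (PySem.Dict.mk e) k

-- outgoing = [e.get("target") for e in edges if e.get("source") == node_id]
def pvOutgoingA (E : List (List (String × String))) (n : String) : List (Option String) :=
  (E.filter (fun e => pvGet e "source" == some n)).map (fun e => pvGet e "target")

-- recursive DFS of A, fuel-guarded for totality (fuel drops once per recursion depth; the wrapper passes
-- enough fuel — proven sufficient below); visited is threaded because Python mutates a shared set.
mutual
def pvDfsA (E : List (List (String × String))) (M : List (String × String)) (K : List String) :
    Nat → String → PySem.Set String → Option (Bool × PySem.Set String)
  | 0, _, _ => none
  | Nat.succ f, n, v =>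
    if K.contains n then some (true, v)
    else if PySem.Set.contains v n || !(PySem.Dict.contains (PySem.Dict.mk M) n) then some (false, v)
    else pvAnyA E M K f (pvOutgoingA E n) (PySem.Set.add v n)
termination_by f _ _ => (f, 0)

-- any(_can_reach_end(t, …) for t in outgoing if t): left-to-right, skipping None and "" (falsy)
def pvAnyA (E : List (List (String × String))) (M : List (String × String)) (K : List String) :
    Nat → List (Option String) → PySem.Set String → Option (Bool × PySem.Set String)
  | _, [], v => some (false, v)
  | f, none :: ts, v => pvAnyA E M K f ts v
  | f, some t :: ts, v =>
    if t == "" then pvAnyA E M K f ts v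
    else
      match pvDfsA E M K f t v with
      | none => none
      | some (true, v2) => some (true, v2)
      | some (false, v2) => pvAnyA E M K f ts v2
termination_by f ts _ => (f, ts.length + 1)
end

def can_reach_end_py (node_id : String) (edges : List (List (String × String))) (node_map : List (String × String)) (end_ids : List String) (visited : Option (List String)) : Bool :=
  let v0 : PySem.Set String := match visited with
    | none => PySem.Set.empty
    | some l => PySem.Set.ofList l
  match pvDfsA edges node_map end_ids (node_map.length + 1) node_id v0 with
  | some (b, _) => b
  | none => false  -- out of fuel: proven unreachable

-- ===== PORT B =====
-- succs = [e.get("target") for e in edges if e.get("source") == cur and e.get("target")]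
def pvSucc (E : List (List (String × String))) (n : String) : List String :=
  E.filterMap (fun e =>
    if pvGet e "source" == some n then
      match pvGet e "target" with
      | some t => if t == "" then none else some t
      | none => none
    else none)

-- the while-loop over the explicit stack (Python's list with top at the END; modelled with top at the HEAD,
-- so 'stack.extend(reversed(succs))' becomes 'pvSucc E n ++ rest'); fuel-guarded for totality
def pvLoopB (E : List (List (String × String))) (M : List (String × String)) (K : List String) :
    Nat → List String → PySem.Set String → Option Bool
  | 0, _, _ => none
  | Nat.succ _, [], _ => some false
  | Nat.succ f, n :: rest, v =>
    if K.contains n then some true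
    else if PySem.Set.contains v n || !(PySem.Dict.contains (PySem.Dict.mk M) n) then pvLoopB E M K f rest v
    else pvLoopB E M K f (pvSucc E n ++ rest) (PySem.Set.add v n)

def can_reach_end_py_alt (node_id : String) (edges : List (List (String × String))) (node_map : List (String × String)) (end_ids : List String) (visited : Option (List String)) : Bool :=
  let v0 : PySem.Set String := match visited with
    | none => PySem.Set.empty
    | some l => PySem.Set.ofList l
  match pvLoopB edges node_map end_ids ((node_map.length + 1) * (edges.length + 1) + 1) [node_id] v0 with
  | some b => b
  | none => false  -- out of fuel: proven unreachable

-- ===== PRECONDITION & SPEC =====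
def Spec_can_reach_end_py (node_id : String) (edges : List (List (String × String))) (node_map : List (String × String)) (end_ids : List String) (visited : Option (List String)) (out : Bool) : Prop := out = can_reach_end_py_alt node_id edges node_map end_ids visited
instance (node_id : String) (edges : List (List (String × String))) (node_map : List (String × String)) (end_ids : List String) (visited : Option (List String)) (out : Bool) : Decidable (Spec_can_reach_end_py node_id edges node_map end_ids visited out) := by unfold Spec_can_reach_end_py; infer_instance

-- ===== CLAIM (what is proved, stated in full; the proofs are below) =====
def Claim_equal_can_reach_end_py : Prop := ∀ (node_id : String) (edges : List (List (String × String))) (node_map : List (String × String)) (end_ids : List String) (visited : Option (List String)), Dom_can_reach_end_py node_id edges node_map end_ids visited → Spec_can_reach_end_py node_id edges node_map end_ids visited (can_reach_end_py node_id edges node_map end_ids visited)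

-- ===== LEMMAS AND PROOFS =====

-- filter on the truthiness of an Option String, as A's generator does
def pvFilterTruthy (ts : List (Option String)) : List String :=
  ts.filterMap (fun t? =>
    match t? with
    | some t => if t == "" then none else some t
    | none => none)

-- the number of node_map keys not yet visited: A's recursion measure
def pvMu (M : List (String × String)) (v : PySem.Set String) : Nat :=
  ((M.map Prod.fst).filter (fun k => !(PySem.Set.contains v k))).length

lemma pvSucc_eq (E : List (List (String × String))) (n : String) :
    pvFilterTruthy (pvOutgoingA E n) = pvSucc E n := by
  induction E with
  | nil => rfl
  | cons e E ih =>
    by_cases hs : (pvGet e "source" == some n) = true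
    · cases ht : pvGet e "target" with
      | none =>
        simp only [pvOutgoingA, pvSucc, pvFilterTruthy, List.filter_cons, List.filterMap_cons,
          hs, if_true, List.map_cons, ht] at ih ⊢
        exact ih
      | some t =>
        by_cases htt : (t == "") = true
        · simp only [pvOutgoingA, pvSucc, pvFilterTruthy, List.filter_cons, List.filterMap_cons,
            hs, if_true, List.map_cons, ht, htt] at ih ⊢
          exact ih
        · simp only [pvOutgoingA, pvSucc, pvFilterTruthy, List.filter_cons, List.filterMap_cons,
            hs, if_true, List.map_cons, ht, htt] at ih ⊢
          rw [ih]
    · simp only [pvOutgoingA, pvSucc, pvFilterTruthy, List.filter_cons, List.filterMap_cons,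
        hs] at ih ⊢
      exact ih

lemma pvFT_nil : pvFilterTruthy [] = [] := rfl

lemma pvFT_none (ts : List (Option String)) : pvFilterTruthy (none :: ts) = pvFilterTruthy ts := by
  simp [pvFilterTruthy]

lemma pvFT_blank (t : String) (ts : List (Option String)) (h : (t == "") = true) :
    pvFilterTruthy (some t :: ts) = pvFilterTruthy ts := by
  simp only [pvFilterTruthy, List.filterMap_cons]
  rw [if_pos h]

lemma pvFT_cons (t : String) (ts : List (Option String)) (h : ¬ (t == "") = true) :
    pvFilterTruthy (some t :: ts) = t :: pvFilterTruthy ts := by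
  simp only [pvFilterTruthy, List.filterMap_cons]
  rw [if_neg h]

lemma pvFilterLenMono {α : Type} (l : List α) (p q : α → Bool) (h : ∀ x ∈ l, p x = true → q x = true) :
    (l.filter p).length ≤ (l.filter q).length := by
  induction l with
  | nil => simp
  | cons a l ih =>
    have hl := ih (fun x hx => h x (List.mem_cons_of_mem a hx))
    cases hp : p a <;> cases hq : q a <;>
      simp [hp, hq] <;> first
        | omega
        | exact absurd (h a List.mem_cons_self hp) (by simp [hq])

lemma pvFilterLenStrict {α : Type} (l : List α) (p q : α → Bool)
    (h : ∀ x ∈ l, p x = true → q x = true)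
    (a : α) (ha : a ∈ l) (hq : q a = true) (hp : p a = false) :
    (l.filter p).length < (l.filter q).length := by
  induction l with
  | nil => cases ha
  | cons b l ih =>
    have hmono := pvFilterLenMono l p q (fun x hx => h x (List.mem_cons_of_mem b hx))
    rcases List.mem_cons.mp ha with rfl | ha'
    · simp only [List.filter_cons, hp, hq, if_true, Bool.false_eq_true, if_false, List.length_cons]
      omega
    · have hlt := ih (fun x hx => h x (List.mem_cons_of_mem b hx)) ha'
      cases hpb : p b <;> cases hqb : q b <;>
        simp [hpb, hqb] <;> first
          | omega
          | exact absurd (h b List.mem_cons_self hpb) (by simp [hqb])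

lemma pvMuMono (M : List (String × String)) (v w : PySem.Set String)
    (h : ∀ x, x ∈ v → x ∈ w) : pvMu M w ≤ pvMu M v := by
  apply pvFilterLenMono
  intro x _ hpx
  simp only [Bool.not_eq_true'] at hpx ⊢
  cases hcv : PySem.Set.contains v x with
  | false => rfl
  | true =>
    exfalso
    have hxw : x ∈ w := h x ((PySem.Set.contains_iff v x).mp hcv)
    exact absurd (((PySem.Set.contains_iff w x).mpr hxw).symm.trans hpx) (by decide)

lemma pvMuStrict (M : List (String × String)) (v : PySem.Set String) (n : String)
    (hn : n ∈ M.map Prod.fst) (hv : n ∉ v) :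
    pvMu M (PySem.Set.add v n) < pvMu M v := by
  refine pvFilterLenStrict _ _ _ ?_ n hn ?_ ?_
  · intro x _ hpx
    simp only [Bool.not_eq_true'] at hpx ⊢
    cases hcv : PySem.Set.contains v x with
    | false => rfl
    | true =>
      exfalso
      have hxw : x ∈ PySem.Set.add v n :=
        (PySem.Set.mem_add v n x).mpr (Or.inl ((PySem.Set.contains_iff v x).mp hcv))
      exact absurd (((PySem.Set.contains_iff _ x).mpr hxw).symm.trans hpx) (by decide)
  · simp only [Bool.not_eq_true']
    cases hcv : PySem.Set.contains v n with
    | false => rfl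
    | true => exact absurd ((PySem.Set.contains_iff v n).mp hcv) hv
  · have hct : PySem.Set.contains (PySem.Set.add v n) n = true :=
      (PySem.Set.contains_iff _ n).mpr ((PySem.Set.mem_add v n n).mpr (Or.inr rfl))
    simp only [hct, Bool.not_true]

-- fuel monotonicity of B's loop
lemma pvLoopB_mono_succ (E : List (List (String × String))) (M : List (String × String)) (K : List String) :
    ∀ f s v r, pvLoopB E M K f s v = some r → pvLoopB E M K (f + 1) s v = some r := by
  intro f
  induction f with
  | zero => intro s v r h; simp [pvLoopB] at h
  | succ f ih =>
    intro s v r h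
    cases s with
    | nil => simpa [pvLoopB] using h
    | cons n rest =>
      simp only [pvLoopB] at h ⊢
      by_cases hK : (K.contains n) = true
      · rw [if_pos hK] at h ⊢; exact h
      · rw [if_neg hK] at h ⊢
        by_cases hc : (PySem.Set.contains v n || !(PySem.Dict.contains (PySem.Dict.mk M) n)) = true
        · rw [if_pos hc] at h ⊢; exact ih _ _ _ h
        · rw [if_neg hc] at h ⊢; exact ih _ _ _ h

lemma pvLoopB_mono (E : List (List (String × String))) (M : List (String × String)) (K : List String)
    (f g : Nat) (hfg : f ≤ g) (s : List String) (v : PySem.Set String) (r : Bool)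
    (h : pvLoopB E M K f s v = some r) : pvLoopB E M K g s v = some r := by
  induction g with
  | zero =>
    have : f = 0 := by omega
    subst this; exact h
  | succ g ih =>
    rcases Nat.lt_or_ge f (g + 1) with hlt | hge
    · exact pvLoopB_mono_succ E M K g s v r (ih (by omega))
    · have : f = g + 1 := by omega
      subst this; exact h

-- fuel sufficiency for A: enough fuel means the DFS returns, and visited only grows
lemma pvDfsA_suff (E : List (List (String × String))) (M : List (String × String)) (K : List String) :
    ∀ f n v, pvMu M v < f →
      ∃ b v', pvDfsA E M K f n v = some (b, v') ∧ ∀ x, x ∈ v → x ∈ v' := by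
  intro f
  induction f with
  | zero => intro n v h; omega
  | succ f ih =>
    have ihAny : ∀ ts v, pvMu M v < f →
        ∃ b v', pvAnyA E M K f ts v = some (b, v') ∧ ∀ x, x ∈ v → x ∈ v' := by
      intro ts
      induction ts with
      | nil => intro v _; exact ⟨false, v, by simp only [pvAnyA], fun x hx => hx⟩
      | cons t? ts ihts =>
        intro v hv
        cases t? with
        | none =>
          obtain ⟨b, v', ha, hsub⟩ := ihts v hv
          exact ⟨b, v', by simp only [pvAnyA]; exact ha, hsub⟩
        | some t =>
          by_cases ht : (t == "") = true
          · obtain ⟨b, v', ha, hsub⟩ := ihts v hv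
            exact ⟨b, v', by simp only [pvAnyA]; rw [if_pos ht]; exact ha, hsub⟩
          · obtain ⟨b, v2, hd, hsub⟩ := ih t v hv
            cases b with
            | true => exact ⟨true, v2, by simp only [pvAnyA]; rw [if_neg ht, hd], hsub⟩
            | false =>
              have hv2 : pvMu M v2 < f := lt_of_le_of_lt (pvMuMono M v v2 hsub) hv
              obtain ⟨b', v', ha, hsub'⟩ := ihts v2 hv2
              refine ⟨b', v', ?_, fun x hx => hsub' x (hsub x hx)⟩
              simp only [pvAnyA]; rw [if_neg ht, hd]; exact ha
    intro n v hv
    by_cases hK : (K.contains n) = true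
    · exact ⟨true, v, by simp only [pvDfsA]; rw [if_pos hK], fun x hx => hx⟩
    · by_cases hc : (PySem.Set.contains v n || !(PySem.Dict.contains (PySem.Dict.mk M) n)) = true
      · exact ⟨false, v, by simp only [pvDfsA]; rw [if_neg hK, if_pos hc], fun x hx => hx⟩
      · have hc' := hc
        simp only [Bool.or_eq_true, Bool.not_eq_true', not_or] at hc'
        have hvis : n ∉ v := fun hm => hc'.1 ((PySem.Set.contains_iff v n).mpr hm)
        have hmap : n ∈ M.map Prod.fst := by
          have hct : PySem.Dict.contains (PySem.Dict.mk M) n = true := by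
            cases hcc : PySem.Dict.contains (PySem.Dict.mk M) n with
            | false => exact absurd hcc hc'.2
            | true => rfl
          have := (PySem.Dict.contains_iff_mem_keys (PySem.Dict.mk M) n).mp hct
          simpa [PySem.Dict.keys_mk] using this
        have hlt : pvMu M (PySem.Set.add v n) < f :=
          lt_of_lt_of_le (pvMuStrict M v n hmap hvis) (by omega)
        obtain ⟨b, v', ha, hsub⟩ := ihAny (pvOutgoingA E n) (PySem.Set.add v n) hlt
        refine ⟨b, v', ?_, fun x hx => hsub x ((PySem.Set.mem_add v n x).mpr (Or.inl hx))⟩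
        simp only [pvDfsA]; rw [if_neg hK, if_neg hc]; exact ha

-- fuel sufficiency for B's loop
lemma pvLoopB_suff (E : List (List (String × String))) (M : List (String × String)) (K : List String) :
    ∀ f s v, s.length + pvMu M v * (E.length + 1) < f → ∃ r, pvLoopB E M K f s v = some r := by
  intro f
  induction f with
  | zero => intro s v h; omega
  | succ f ih =>
    intro s v hs
    cases s with
    | nil => exact ⟨false, by simp only [pvLoopB]⟩
    | cons n rest =>
      by_cases hK : (K.contains n) = true
      · exact ⟨true, by simp only [pvLoopB]; rw [if_pos hK]⟩
      · by_cases hc : (PySem.Set.contains v n || !(PySem.Dict.contains (PySem.Dict.mk M) n)) = true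
        · obtain ⟨r, hr⟩ := ih rest v (by simp only [List.length_cons] at hs; omega)
          exact ⟨r, by simp only [pvLoopB]; rw [if_neg hK, if_pos hc]; exact hr⟩
        · have hc' := hc
          simp only [Bool.or_eq_true, Bool.not_eq_true', not_or] at hc'
          have hvis : n ∉ v := fun hm => hc'.1 ((PySem.Set.contains_iff v n).mpr hm)
          have hmap : n ∈ M.map Prod.fst := by
            have hct : PySem.Dict.contains (PySem.Dict.mk M) n = true := by
              cases hcc : PySem.Dict.contains (PySem.Dict.mk M) n with
              | false => exact absurd hcc hc'.2
              | true => rfl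
            have := (PySem.Dict.contains_iff_mem_keys (PySem.Dict.mk M) n).mp hct
            simpa [PySem.Dict.keys_mk] using this
          have hmu : pvMu M (PySem.Set.add v n) + 1 ≤ pvMu M v := pvMuStrict M v n hmap hvis
          have hsucclen : (pvSucc E n).length ≤ E.length := by
            simpa [pvSucc] using List.length_filterMap_le _ E
          have hmul : (pvMu M (PySem.Set.add v n) + 1) * (E.length + 1) ≤ pvMu M v * (E.length + 1) :=
            Nat.mul_le_mul_right _ hmu
          rw [Nat.add_mul, Nat.one_mul] at hmul
          obtain ⟨r, hr⟩ := ih (pvSucc E n ++ rest) (PySem.Set.add v n) (by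
            simp only [List.length_append, List.length_cons] at hs ⊢
            omega)
          exact ⟨r, by simp only [pvLoopB]; rw [if_neg hK, if_neg hc]; exact hr⟩

-- the simulation: A's DFS on a node corresponds to B's loop with that node pushed on any stack
lemma pvSim (E : List (List (String × String))) (M : List (String × String)) (K : List String) :
    ∀ f n v b v', pvDfsA E M K f n v = some (b, v') → ∀ rest,
      (b = true → ∃ g, pvLoopB E M K g (n :: rest) v = some true) ∧
      (b = false → ∀ g r, pvLoopB E M K g rest v' = some r →
        ∃ g', pvLoopB E M K g' (n :: rest) v = some r) := by
  intro f
  induction f with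
  | zero => intro n v b v' h; simp [pvDfsA] at h
  | succ f ih =>
    have ihAny : ∀ ts v b v', pvAnyA E M K f ts v = some (b, v') → ∀ rest,
        (b = true → ∃ g, pvLoopB E M K g (pvFilterTruthy ts ++ rest) v = some true) ∧
        (b = false → ∀ g r, pvLoopB E M K g rest v' = some r →
          ∃ g', pvLoopB E M K g' (pvFilterTruthy ts ++ rest) v = some r) := by
      intro ts
      induction ts with
      | nil =>
        intro v b v' h rest
        simp only [pvAnyA, Option.some.injEq, Prod.mk.injEq] at h
        obtain ⟨hb, hv⟩ := h
        subst hb; subst hv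
        refine ⟨fun hb => absurd hb (by decide), fun _ g r hg => ⟨g, ?_⟩⟩
        rw [pvFT_nil]
        simpa using hg
      | cons t? ts ihts =>
        intro v b v' h rest
        cases t? with
        | none =>
          have hh : pvAnyA E M K f ts v = some (b, v') := by
            simp only [pvAnyA] at h; exact h
          have := ihts v b v' hh rest
          rw [pvFT_none]
          exact this
        | some t =>
          by_cases ht : (t == "") = true
          · have hh : pvAnyA E M K f ts v = some (b, v') := by
              simp only [pvAnyA] at h; rw [if_pos ht] at h; exact h
            have := ihts v b v' hh rest
            rw [pvFT_blank t ts ht]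
            exact this
          · simp only [pvAnyA] at h
            rw [if_neg ht] at h
            rw [pvFT_cons t ts ht]
            cases hd : pvDfsA E M K f t v with
            | none => rw [hd] at h; cases h
            | some p =>
              obtain ⟨bd, v2⟩ := p
              rw [hd] at h
              have hSim := ih t v bd v2 hd (pvFilterTruthy ts ++ rest)
              cases bd with
              | true =>
                simp only [Option.some.injEq, Prod.mk.injEq] at h
                obtain ⟨hb, hv⟩ := h
                subst hb; subst hv
                refine ⟨fun _ => ?_, fun hb => absurd hb (by decide)⟩
                obtain ⟨g, hg⟩ := hSim.1 rfl
                exact ⟨g, by simpa using hg⟩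
              | false =>
                have hrec := ihts v2 b v' h rest
                constructor
                · intro hb
                  obtain ⟨g, hg⟩ := hrec.1 hb
                  obtain ⟨g', hg'⟩ := hSim.2 rfl g true hg
                  exact ⟨g', by simpa using hg'⟩
                · intro hb g r hg
                  obtain ⟨g1, hg1⟩ := hrec.2 hb g r hg
                  obtain ⟨g', hg'⟩ := hSim.2 rfl g1 r hg1
                  exact ⟨g', by simpa using hg'⟩
    intro n v b v' h rest
    simp only [pvDfsA] at h
    by_cases hK : (K.contains n) = true
    · rw [if_pos hK] at h
      simp only [Option.some.injEq, Prod.mk.injEq] at h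
      obtain ⟨hb, hv⟩ := h
      subst hb; subst hv
      refine ⟨fun _ => ⟨1, ?_⟩, fun hb => absurd hb (by decide)⟩
      simp only [pvLoopB]; rw [if_pos hK]
    · rw [if_neg hK] at h
      by_cases hc : (PySem.Set.contains v n || !(PySem.Dict.contains (PySem.Dict.mk M) n)) = true
      · rw [if_pos hc] at h
        simp only [Option.some.injEq, Prod.mk.injEq] at h
        obtain ⟨hb, hv⟩ := h
        subst hb; subst hv
        refine ⟨fun hb => absurd hb (by decide), fun _ g r hg => ⟨g + 1, ?_⟩⟩
        simp only [pvLoopB]; rw [if_neg hK, if_pos hc]; exact hg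
      · rw [if_neg hc] at h
        have hAny := ihAny (pvOutgoingA E n) (PySem.Set.add v n) b v' h rest
        rw [pvSucc_eq E n] at hAny
        constructor
        · intro hb
          obtain ⟨g, hg⟩ := hAny.1 hb
          refine ⟨g + 1, ?_⟩
          simp only [pvLoopB]; rw [if_neg hK, if_neg hc]; exact hg
        · intro hb g r hg
          obtain ⟨g', hg'⟩ := hAny.2 hb g r hg
          refine ⟨g' + 1, ?_⟩
          simp only [pvLoopB]; rw [if_neg hK, if_neg hc]; exact hg'

-- the two fueled programs agree for any common start set
lemma pvMain (E : List (List (String × String))) (M : List (String × String)) (K : List String)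
    (n : String) (v0 : PySem.Set String) :
    (match pvDfsA E M K (M.length + 1) n v0 with
      | some (b, _) => b
      | none => false) =
    (match pvLoopB E M K ((M.length + 1) * (E.length + 1) + 1) [n] v0 with
      | some b => b
      | none => false) := by
  have hmu0 : pvMu M v0 ≤ M.length := by
    calc pvMu M v0 ≤ (M.map Prod.fst).length := List.length_filter_le _ _
    _ = M.length := by simp
  obtain ⟨b, v', hA, _⟩ := pvDfsA_suff E M K (M.length + 1) n v0 (by omega)
  have hmul : pvMu M v0 * (E.length + 1) ≤ M.length * (E.length + 1) :=
    Nat.mul_le_mul_right _ hmu0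
  obtain ⟨r, hB⟩ := pvLoopB_suff E M K ((M.length + 1) * (E.length + 1) + 1) [n] v0 (by
    have hx : (M.length + 1) * (E.length + 1) = M.length * (E.length + 1) + (E.length + 1) := by ring
    simp only [List.length_cons, List.length_nil]
    omega)
  have hSim := pvSim E M K (M.length + 1) n v0 b v' hA []
  have hBb : ∃ g, pvLoopB E M K g [n] v0 = some b := by
    cases b with
    | true => exact hSim.1 rfl
    | false => exact hSim.2 rfl 1 false (by simp only [pvLoopB])
  obtain ⟨g, hg⟩ := hBb
  have h1 := pvLoopB_mono E M K g (max g ((M.length + 1) * (E.length + 1) + 1)) (le_max_left _ _) _ _ _ hg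
  have h2 := pvLoopB_mono E M K ((M.length + 1) * (E.length + 1) + 1)
    (max g ((M.length + 1) * (E.length + 1) + 1)) (le_max_right _ _) _ _ _ hB
  rw [h1] at h2
  injection h2 with hbr
  rw [hA, hB, hbr]

-- ===== VERDICT (by name: the statement is the Claim_ definition above) =====
theorem can_reach_end_py_spec : Claim_equal_can_reach_end_py := by
  intro node_id E M K visited _
  unfold Spec_can_reach_end_py can_reach_end_py can_reach_end_py_alt
  cases visited with
  | none => exact pvMain E M K node_id PySem.Set.empty
  | some l => exact pvMain E M K node_id (PySem.Set.ofList l)
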